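-- pv_equiv track=rewrite | github.com/schnappischnap/advent_of_code_2018 | day_20_a_regular_map.py | solve
-- ===== SOURCE A (Python) =====
-- from collections import defaultdict
--
-- def solve(data):
--     distances = defaultdict(int)
--     positions = []
--     x, y = 0, 0
--     for c in data[1:-1]:
--         if c == '(':
--             positions.append((x, y))
--         elif c == ')':
--             x, y = positions.pop()
--         elif c == '|':
--             x, y = positions[-1]
--         else:
--             dx, dy = {'N': (0, -1), 'E': (1, 0), 'S': (0, 1), 'W': (-1, 0)}[c]
--             new_x, new_y = x+dx, y+dy
--             prev_distance = distances.get((new_x, new_y), 10000000000)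
--             distances[(new_x, new_y)] = min(prev_distance, distances[(x, y)] + 1)
--             x, y = new_x, new_y
--
--     return max(distances.values()), sum(d >= 1000 for d in distances.values())
-- ===== SOURCE B (Python) =====
-- from collections import defaultdict
--
-- def solve(data):
--     body = data[1:-1]
--     dirs = {'N': (0, -1), 'E': (1, 0), 'S': (0, 1), 'W': (-1, 0)}
--     dist = defaultdict(int)
--
--     def walk(i, x, y):
--         # consume directions and groups from body[i]; stop at ')', '|' or the end
--         while i < len(body):
--             c = body[i]
--             if c in dirs:
--                 dx, dy = dirs[c]
--                 nx, ny = x + dx, y + dy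
--                 dist[(nx, ny)] = min(dist.get((nx, ny), 10000000000), dist[(x, y)] + 1)
--                 x, y = nx, ny
--                 i += 1
--             elif c == '(':
--                 j = walk(i + 1, x, y)            # first alternative, from the group start
--                 while j < len(body) and body[j] == '|':
--                     j = walk(j + 1, x, y)        # further alternatives, again from the start
--                 if j < len(body) and body[j] != ')':
--                     raise ValueError("bad character %r" % body[j])
--                 i = j + 1                        # past the ')' (or past a truncated group's end)
--             else:
--                 return i
--         return i
--
--     if walk(0, 0, 0) < len(body):
--         raise ValueError("stray %r" % body[walk(0, 0, 0)])
--     return max(dist.values()), sum(d >= 1000 for d in dist.values())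
-- ===== Notes on version B (the rewrite author's own statement) =====
-- stated objective: alternative
-- what changed: Replaced A's flat loop over an explicit positions stack by a recursive-descent parser over the regex grammar: a walker consumes direction characters left-to-right and on '(' recursively parses the '|'-separated alternatives (each from the group's start position) through the closing ')'; the defaultdict distance update and the left-to-right order are identical, and B raises exactly where A raises.
import Mathlib
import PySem

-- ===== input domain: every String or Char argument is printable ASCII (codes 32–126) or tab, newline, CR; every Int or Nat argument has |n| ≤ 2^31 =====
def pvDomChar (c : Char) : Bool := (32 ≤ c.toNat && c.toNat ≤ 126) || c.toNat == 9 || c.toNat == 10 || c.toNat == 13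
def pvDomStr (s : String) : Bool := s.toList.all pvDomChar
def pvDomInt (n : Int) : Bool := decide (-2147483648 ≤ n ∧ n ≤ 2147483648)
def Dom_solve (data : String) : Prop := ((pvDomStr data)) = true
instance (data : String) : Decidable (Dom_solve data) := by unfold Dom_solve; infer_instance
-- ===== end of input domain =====

-- B replaces A's explicit position-stack loop with a recursive-descent parser over the
-- '(' … '|' … ')' grammar (objective: alternative decomposition, similar cost).

-- data[1:-1], shared by both ports and by Pre_solve
def bodyOf (data : String) : List Char :=
  PySem.List.slice data.toList (some 1) (some (-1))

-- {'N': (0,-1), 'E': (1,0), 'S': (0,1), 'W': (-1,0)} lookup (none = KeyError)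
def dirOf? (c : Char) : Option (Int × Int) :=
  if c = 'N' then some (0, -1)
  else if c = 'E' then some (1, 0)
  else if c = 'S' then some (0, 1)
  else if c = 'W' then some (-1, 0)
  else none

abbrev DistMap := PySem.Dict (Int × Int) Int

-- shared final line of BOTH Pythons: 'return max(distances.values()), sum(d >= 1000 for d in …)'
-- (the `none` arm is Python's ValueError on an empty dict, excluded by Pre_solve)
def finish (d : DistMap) : Int × Int :=
  match PySem.List.max? d.values (fun v => v) with
  | none => (0, 0)
  | some m => (m, d.values.foldl (fun acc v => acc + if 1000 ≤ v then 1 else 0) 0)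

-- ===== PORT A =====
-- state: (distances, positions stack (top = head), x, y); none = the IndexError/KeyError paths
abbrev StA := DistMap × List (Int × Int) × Int × Int

def stepA (s : Option StA) (c : Char) : Option StA :=
  match s with
  | none => none
  | some (d, ps, x, y) =>
    if c = '(' then some (d, (x, y) :: ps, x, y)
    else if c = ')' then
      match ps with
      | [] => none                                  -- positions.pop() on empty: IndexError
      | p :: rest => some (d, rest, p.1, p.2)
    else if c = '|' then
      match ps with
      | [] => none                                  -- positions[-1] on empty: IndexError
      | p :: rest => some (d, p :: rest, p.1, p.2)
    else
      match dirOf? c with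
      | none => none                                -- KeyError in the direction dict
      | some (dx, dy) =>
        let nx := x + dx
        let ny := y + dy
        let prev := d.getD (nx, ny) 10000000000
        -- distances[(x,y)] on a defaultdict(int): inserts 0 when the key is absent
        match d.get? (x, y) with
        | some v => some (d.insert (nx, ny) (min prev (v + 1)), ps, nx, ny)
        | none =>
          some ((d.insert (x, y) 0).insert (nx, ny) (min prev (0 + 1)), ps, nx, ny)

def solve (data : String) : Int × Int :=
  match (bodyOf data).foldl stepA (some (PySem.Dict.empty, [], 0, 0)) with
  | none => (0, 0)                                  -- Python raises here; excluded by Pre_solve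
  | some (d, _, _, _) => finish d

-- ===== PORT B =====
-- recursive-descent walker.  The fuel argument only makes the mutual recursion structural;
-- the value passed in solve_alt is always sufficient.  walkB returns some (unconsumed
-- suffix, distances), stopping at ')' , '|' or the end; altsB parses the '|'-separated
-- alternatives of one group, each from the group's start position, and consumes the
-- closing ')' (a truncated group simply ends at the end of the input, as in A's loop);
-- none = a raise in Source B (a bad character closing a group); excluded by Pre_solve.
mutual
def walkB : Nat → List Char → Int → Int → DistMap → Option (List Char × DistMap)
  | 0, _, _, _, _ => none                           -- fuel exhaustion: unreachable from solve_alt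
  | Nat.succ f, cs, x, y, d =>
    match cs with
    | [] => some ([], d)
    | c :: r =>
      match dirOf? c with
      | some (dx, dy) =>
        let nx := x + dx
        let ny := y + dy
        let prev := d.getD (nx, ny) 10000000000
        -- dist[(x,y)] on a defaultdict(int): inserts 0 when the key is absent (as in A)
        match d.get? (x, y) with
        | some v => walkB f r nx ny (d.insert (nx, ny) (min prev (v + 1)))
        | none => walkB f r nx ny ((d.insert (x, y) 0).insert (nx, ny) (min prev (0 + 1)))
      | none =>
        if c = '(' then
          match altsB f r x y d with
          | none => none
          | some (r1, d1) => walkB f r1 x y d1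
        else some (c :: r, d)
  termination_by structural f cs x y d => f

def altsB : Nat → List Char → Int → Int → DistMap → Option (List Char × DistMap)
  | 0, _, _, _, _ => none
  | Nat.succ f, cs, x, y, d =>
    match walkB f cs x y d with
    | none => none
    | some (r1, d1) =>
      match r1 with
      | [] => some ([], d1)                         -- truncated group: Source B's i = j + 1 runs past the end
      | c1 :: r2 =>
        if c1 = ')' then some (r2, d1)              -- group closed: Source B sets i = j + 1
        else if c1 = '|' then altsB f r2 x y d1     -- next alternative, from the start position
        else none                                   -- Source B: raise ValueError (bad character)
  termination_by structural f cs x y d => f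
end

def solve_alt (data : String) : Int × Int :=
  match walkB (2 * (bodyOf data).length + 2) (bodyOf data) 0 0 PySem.Dict.empty with
  | some ([], d) => finish d
  | _ => (0, 0)                                     -- Source B raises here; excluded by Pre_solve

-- ===== PRECONDITION & SPEC =====
-- One left-to-right scan of data[1:-1] carrying the '(' nesting depth and whether a
-- direction character was seen: true iff every character is one of NESW(|), every ')'
-- and '|' occurs at positive depth, and some direction character occurs.
def preCheck (k : Nat) (seen : Bool) : List Char → Bool
  | [] => seen
  | c :: r =>
    if c = '(' then preCheck (k + 1) seen r
    else if c = ')' then decide (0 < k) && preCheck (k - 1) seen r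
    else if c = '|' then decide (0 < k) && preCheck k seen r
    else if c = 'N' ∨ c = 'E' ∨ c = 'S' ∨ c = 'W' then preCheck k true r
    else false

-- Pre_solve = exactly the inputs on which the Python A returns: otherwise it raises
-- IndexError (')' or '|' with an empty positions stack), KeyError (a character other
-- than NESW(|)) or ValueError (max() of an empty dict when no direction char occurs).
-- B raises on exactly the same inputs (with ValueError).
def Pre_solve (data : String) : Prop := preCheck 0 false (bodyOf data) = true

instance (data : String) : Decidable (Pre_solve data) := by unfold Pre_solve; infer_instance

def pvWitness_solve : String := "^N(E|W)N$"

def Spec_solve (data : String) (out : Int × Int) : Prop := out = solve_alt data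
instance (data : String) (out : Int × Int) : Decidable (Spec_solve data out) := by unfold Spec_solve; infer_instance

-- ===== CLAIM (what is proved, stated in full; the proof is below) =====
def Claim_equal_solve : Prop := ∀ (data : String), Dom_solve data → Pre_solve data → Spec_solve data (solve data)

-- ===== LEMMAS AND PROOFS =====

-- A's fold, abbreviated
def runA (s : Option StA) (cs : List Char) : Option StA := cs.foldl stepA s

theorem runA_cons (s : Option StA) (c : Char) (r : List Char) :
    runA s (c :: r) = runA (stepA s c) r := rfl

-- a successful walkB/altsB leaves a suffix of its input
theorem suffix_walk_alts (f : Nat) :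
    (∀ cs x y d r1 d1, walkB f cs x y d = some (r1, d1) → r1 <:+ cs) ∧
    (∀ cs x y d r1 d1, altsB f cs x y d = some (r1, d1) → r1 <:+ cs) := by
  induction f with
  | zero => exact ⟨fun cs x y d r1 d1 h => by simp [walkB] at h,
                   fun cs x y d r1 d1 h => by simp [altsB] at h⟩
  | succ f ih =>
    obtain ⟨ihw, iha⟩ := ih
    constructor
    · intro cs x y d r1 d1 h
      cases cs with
      | nil => simp [walkB] at h; rw [h.1]
      | cons c r =>
        rcases hdir : dirOf? c with _ | ⟨dx, dy⟩
        · by_cases hpar : c = '('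
          · subst hpar
            simp only [walkB, hdir, reduceIte] at h
            rcases halts : altsB f r x y d with _ | ⟨ra, da⟩
            · rw [halts] at h; cases h
            · rw [halts] at h
              exact ((ihw _ _ _ _ _ _ h).trans (iha _ _ _ _ _ _ halts)).trans
                (List.suffix_cons _ _)
          · simp only [walkB, hdir, if_neg hpar, Option.some.injEq, Prod.mk.injEq] at h
            rw [← h.1]
        · simp only [walkB, hdir] at h
          rcases hg : d.get? (x, y) with _ | v <;> rw [hg] at h <;>
            exact (ihw _ _ _ _ _ _ h).trans (List.suffix_cons _ _)
    · intro cs x y d r1 d1 h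
      simp only [altsB] at h
      rcases hw : walkB f cs x y d with _ | ⟨rw_, dw⟩
      · rw [hw] at h; cases h
      · rw [hw] at h
        have hsuf : rw_ <:+ cs := ihw _ _ _ _ _ _ hw
        cases rw_ with
        | nil =>
          simp only [Option.some.injEq, Prod.mk.injEq] at h
          rw [← h.1]; exact List.nil_suffix
        | cons c1 r2 =>
          replace h : (if c1 = ')' then some (r2, dw)
              else if c1 = '|' then altsB f r2 x y dw else none) = some (r1, d1) := h
          split_ifs at h with hpar hbar
          · simp only [Option.some.injEq, Prod.mk.injEq] at h
            rw [← h.1]; exact (List.suffix_cons _ _).trans hsuf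
          · exact (iha _ _ _ _ _ _ h).trans ((List.suffix_cons _ _).trans hsuf)

-- simulation: each successful walkB/altsB step corresponds to A's fold on the consumed
-- prefix.  walkB: same stack, some end position; altsB: either the closing ')' was
-- consumed (A pops the group's start and resets the position to it) or the input ended
-- inside the group (then only the distance dicts coincide, which is all solve uses).
theorem sim_walk_alts (f : Nat) :
    (∀ cs x y d st r1 d1, walkB f cs x y d = some (r1, d1) →
       (∃ x' y', runA (some (d, st, x, y)) cs = runA (some (d1, st, x', y')) r1) ∨
       (r1 = [] ∧ ∃ st' x' y', runA (some (d, st, x, y)) cs = some (d1, st', x', y'))) ∧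
    (∀ cs x y d st r1 d1, altsB f cs x y d = some (r1, d1) →
       (runA (some (d, (x, y) :: st, x, y)) cs = runA (some (d1, st, x, y)) r1) ∨
       (r1 = [] ∧ ∃ st' x' y', runA (some (d, (x, y) :: st, x, y)) cs = some (d1, st', x', y'))) := by
  induction f with
  | zero => exact ⟨fun cs x y d st r1 d1 h => by simp [walkB] at h,
                   fun cs x y d st r1 d1 h => by simp [altsB] at h⟩
  | succ f ih =>
    obtain ⟨ihw, iha⟩ := ih
    constructor
    · intro cs x y d st r1 d1 h
      cases cs with
      | nil =>
        simp only [walkB, Option.some.injEq, Prod.mk.injEq] at h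
        exact Or.inl ⟨x, y, by rw [← h.1, ← h.2]⟩
      | cons c r =>
        rcases hdir : dirOf? c with _ | ⟨dx, dy⟩
        · by_cases hpar : c = '('
          · subst hpar
            simp only [walkB, hdir, reduceIte] at h
            rcases halts : altsB f r x y d with _ | ⟨ra, da⟩
            · rw [halts] at h; cases h
            · rw [halts] at h
              have hpush : runA (some (d, st, x, y)) ('(' :: r)
                  = runA (some (d, (x, y) :: st, x, y)) r := by
                rw [runA_cons]; simp [stepA]
              rcases iha _ _ _ _ st _ _ halts with hrun1 | ⟨hnil, st2, x2, y2, hrun1⟩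
              · rcases ihw _ _ _ _ st _ _ h with ⟨x3, y3, hrun2⟩ | ⟨hnil2, st3, x3, y3, hrun2⟩
                · exact Or.inl ⟨x3, y3, by rw [hpush, hrun1, hrun2]⟩
                · exact Or.inr ⟨hnil2, st3, x3, y3, by rw [hpush, hrun1, hrun2]⟩
              · -- the group ran to the end of the input: walkB f [] returns the same dict
                subst hnil
                cases f with
                | zero => simp [walkB] at h
                | succ f' =>
                  simp only [walkB, Option.some.injEq, Prod.mk.injEq] at h
                  exact Or.inr ⟨h.1.symm, st2, x2, y2, by rw [hpush, hrun1, h.2]⟩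
          · simp only [walkB, hdir, if_neg hpar, Option.some.injEq, Prod.mk.injEq] at h
            exact Or.inl ⟨x, y, by rw [← h.1, ← h.2]⟩
        · have hc4 : c = 'N' ∨ c = 'E' ∨ c = 'S' ∨ c = 'W' := by
            unfold dirOf? at hdir; split_ifs at hdir <;> tauto
          have hne : c ≠ '(' ∧ c ≠ ')' ∧ c ≠ '|' := by
            rcases hc4 with rfl | rfl | rfl | rfl <;> exact ⟨by decide, by decide, by decide⟩
          simp only [walkB, hdir] at h
          rcases hg : d.get? (x, y) with _ | v <;> rw [hg] at h
          · have hstep : runA (some (d, st, x, y)) (c :: r)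
                = runA (some ((d.insert (x, y) 0).insert (x + dx, y + dy)
                    (min (d.getD (x + dx, y + dy) 10000000000) (0 + 1)), st,
                    x + dx, y + dy)) r := by
              rw [runA_cons]
              simp only [stepA, if_neg hne.1, if_neg hne.2.1, if_neg hne.2.2, hdir, hg]
            rcases ihw _ _ _ _ st _ _ h with ⟨x2, y2, hrun2⟩ | ⟨hnil, st2, x2, y2, hrun2⟩
            · exact Or.inl ⟨x2, y2, by rw [hstep, hrun2]⟩
            · exact Or.inr ⟨hnil, st2, x2, y2, by rw [hstep, hrun2]⟩
          · have hstep : runA (some (d, st, x, y)) (c :: r)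
                = runA (some (d.insert (x + dx, y + dy)
                    (min (d.getD (x + dx, y + dy) 10000000000) (v + 1)), st,
                    x + dx, y + dy)) r := by
              rw [runA_cons]
              simp only [stepA, if_neg hne.1, if_neg hne.2.1, if_neg hne.2.2, hdir, hg]
            rcases ihw _ _ _ _ st _ _ h with ⟨x2, y2, hrun2⟩ | ⟨hnil, st2, x2, y2, hrun2⟩
            · exact Or.inl ⟨x2, y2, by rw [hstep, hrun2]⟩
            · exact Or.inr ⟨hnil, st2, x2, y2, by rw [hstep, hrun2]⟩
    · intro cs x y d st r1 d1 h
      simp only [altsB] at h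
      rcases hw : walkB f cs x y d with _ | ⟨rw_, dw⟩
      · rw [hw] at h; cases h
      · rw [hw] at h
        rcases ihw _ _ _ _ ((x, y) :: st) _ _ hw with ⟨x2, y2, hrun2⟩ | ⟨hnil, st2, x2, y2, hrun2⟩
        · cases rw_ with
          | nil =>
            simp only [Option.some.injEq, Prod.mk.injEq] at h
            exact Or.inr ⟨h.1.symm, (x, y) :: st, x2, y2, by rw [hrun2, h.2]; rfl⟩
          | cons c1 r2 =>
            replace h : (if c1 = ')' then some (r2, dw)
                else if c1 = '|' then altsB f r2 x y dw else none) = some (r1, d1) := h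
            split_ifs at h with hpar hbar
            · subst hpar
              simp only [Option.some.injEq, Prod.mk.injEq] at h
              refine Or.inl ?_
              rw [← h.1, ← h.2]
              calc runA (some (d, (x, y) :: st, x, y)) cs
                  = runA (some (dw, (x, y) :: st, x2, y2)) (')' :: r2) := hrun2
                _ = runA (some (dw, st, x, y)) r2 := by rw [runA_cons]; simp [stepA]
            · subst hbar
              have hreset : runA (some (d, (x, y) :: st, x, y)) cs
                  = runA (some (dw, (x, y) :: st, x, y)) r2 := by
                rw [hrun2, runA_cons]; simp [stepA]
              rcases iha _ _ _ _ st _ _ h with hrun3 | ⟨hnil3, st3, x3, y3, hrun3⟩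
              · exact Or.inl (by rw [hreset, hrun3])
              · exact Or.inr ⟨hnil3, st3, x3, y3, by rw [hreset, hrun3]⟩
        · -- walkB already ran to the end of the input
          subst hnil
          simp only [Option.some.injEq, Prod.mk.injEq] at h
          exact Or.inr ⟨h.1.symm, st2, x2, y2, by rw [hrun2, h.2]⟩

-- totality: under preCheck, walkB at depth 0 consumes everything and succeeds; at a
-- positive depth it stops at a ')' or '|' (or at the end of a truncated input); altsB
-- inside a group always succeeds
theorem total_walk_alts (f : Nat) :
    (∀ cs x y d k s, 2 * cs.length + 1 ≤ f → preCheck k s cs = true →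
       (k = 0 → ∃ d1, walkB f cs x y d = some ([], d1)) ∧
       (0 < k → ∃ rr d1, walkB f cs x y d = some (rr, d1) ∧
          (rr = [] ∨
           (∃ r2 s2, rr = ')' :: r2 ∧ preCheck (k - 1) s2 r2 = true) ∨
           (∃ r2 s2, rr = '|' :: r2 ∧ preCheck k s2 r2 = true)))) ∧
    (∀ cs x y d k s, 2 * cs.length + 2 ≤ f → preCheck (k + 1) s cs = true →
       ∃ r1 d1, altsB f cs x y d = some (r1, d1) ∧
         ((∃ s1, preCheck k s1 r1 = true) ∨ r1 = [])) := by
  induction f with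
  | zero =>
    constructor <;> (intro cs x y d k s hf _; exact absurd hf (by omega))
  | succ f ih =>
    obtain ⟨ihw, iha⟩ := ih
    constructor
    · intro cs x y d k s hf hpre
      cases cs with
      | nil =>
        refine ⟨fun _ => ⟨d, by simp [walkB]⟩,
                fun _ => ⟨[], d, by simp [walkB], Or.inl rfl⟩⟩
      | cons c r =>
        unfold preCheck at hpre
        split_ifs at hpre with h1 h2 h3 h4
        · -- '(' : parse the group with altsB, then continue
          subst h1
          simp only [List.length_cons] at hf
          obtain ⟨r1, d1, halts, hcont⟩ :=
            iha r x y d k s (by omega) (by simpa using hpre)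
          have hr1r : r1 <:+ r := (suffix_walk_alts f).2 _ _ _ _ _ _ halts
          rcases hcont with ⟨s1, hpre1⟩ | hnil
          · obtain ⟨hz, hp⟩ :=
              ihw r1 x y d1 k s1 (by have := hr1r.length_le; omega) hpre1
            constructor
            · intro hk0
              obtain ⟨d2, hw2⟩ := hz hk0
              exact ⟨d2, by simp only [walkB, dirOf?, reduceIte, halts]; exact hw2⟩
            · intro hkpos
              obtain ⟨rr, d2, hw2, hshape⟩ := hp hkpos
              exact ⟨rr, d2, by simp only [walkB, dirOf?, reduceIte, halts]; exact hw2, hshape⟩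
          · -- truncated group: the rest of the input is empty
            subst hnil
            cases f with
            | zero => exact absurd hf (by omega)
            | succ f' =>
              have hres : walkB (f' + 1 + 1) ('(' :: r) x y d = some ([], d1) := by
                simp [walkB, dirOf?, halts]
              exact ⟨fun _ => ⟨d1, hres⟩, fun _ => ⟨[], d1, hres, Or.inl rfl⟩⟩
        · -- ')' : stop here
          subst h2
          rw [Bool.and_eq_true] at hpre
          have hkpos : 0 < k := of_decide_eq_true hpre.1
          refine ⟨fun h0 => absurd h0 (by omega), fun _ =>
            ⟨')' :: r, d, ?_, Or.inr (Or.inl ⟨r, s, rfl, hpre.2⟩)⟩⟩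
          simp [walkB, dirOf?]
        · -- '|' : stop here
          subst h3
          rw [Bool.and_eq_true] at hpre
          have hkpos : 0 < k := of_decide_eq_true hpre.1
          refine ⟨fun h0 => absurd h0 (by omega), fun _ =>
            ⟨'|' :: r, d, ?_, Or.inr (Or.inr ⟨r, s, rfl, hpre.2⟩)⟩⟩
          simp [walkB, dirOf?]
        · -- a direction character
          have hdir : ∃ dx dy, dirOf? c = some (dx, dy) := by
            rcases h4 with rfl | rfl | rfl | rfl <;> exact ⟨_, _, rfl⟩
          obtain ⟨dx, dy, hdir⟩ := hdir
          simp only [List.length_cons] at hf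
          rcases hg : d.get? (x, y) with _ | v
          · obtain ⟨hz, hp⟩ :=
              ihw r (x + dx) (y + dy)
                ((d.insert (x, y) 0).insert (x + dx, y + dy)
                  (min (d.getD (x + dx, y + dy) 10000000000) (0 + 1)))
                k true (by omega) hpre
            constructor
            · intro hk0
              obtain ⟨d2, hw2⟩ := hz hk0
              exact ⟨d2, by simp only [walkB, hdir, hg]; exact hw2⟩
            · intro hkpos
              obtain ⟨rr, d2, hw2, hshape⟩ := hp hkpos
              exact ⟨rr, d2, by simp only [walkB, hdir, hg]; exact hw2, hshape⟩
          · obtain ⟨hz, hp⟩ :=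
              ihw r (x + dx) (y + dy)
                (d.insert (x + dx, y + dy)
                  (min (d.getD (x + dx, y + dy) 10000000000) (v + 1)))
                k true (by omega) hpre
            constructor
            · intro hk0
              obtain ⟨d2, hw2⟩ := hz hk0
              exact ⟨d2, by simp only [walkB, hdir, hg]; exact hw2⟩
            · intro hkpos
              obtain ⟨rr, d2, hw2, hshape⟩ := hp hkpos
              exact ⟨rr, d2, by simp only [walkB, hdir, hg]; exact hw2, hshape⟩
    · intro cs x y d k s hf hpre
      obtain ⟨_, hp⟩ := ihw cs x y d (k + 1) s (by omega) hpre
      obtain ⟨rr, d1, hw1, hshape⟩ := hp (by omega)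
      have hsuf : rr <:+ cs := (suffix_walk_alts f).1 _ _ _ _ _ _ hw1
      rcases hshape with hnil | ⟨r2, s2, rfl, hpre2⟩ | ⟨r2, s2, rfl, hpre2⟩
      · subst hnil
        exact ⟨[], d1, by simp [altsB, hw1], Or.inr rfl⟩
      · refine ⟨r2, d1, ?_, Or.inl ⟨s2, by simpa using hpre2⟩⟩
        simp [altsB, hw1]
      · have hlen : r2.length + 1 ≤ cs.length := by simpa using hsuf.length_le
        obtain ⟨r3, d3, halts3, hcont3⟩ :=
          iha r2 x y d1 k s2 (by omega) hpre2
        refine ⟨r3, d3, ?_, hcont3⟩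
        simp only [altsB, hw1]
        split_ifs with h'
        · exact absurd h' (by decide)
        · exact halts3

-- ===== VERDICT (by name: the statement is the Claim_ definition above) =====
theorem solve_spec : Claim_equal_solve := by
  intro data _ hpre
  unfold Spec_solve
  have hpre' : preCheck 0 false (bodyOf data) = true := hpre
  obtain ⟨hz, _⟩ :=
    (total_walk_alts (2 * (bodyOf data).length + 2)).1 (bodyOf data) 0 0
      PySem.Dict.empty 0 false (by omega) hpre'
  obtain ⟨d1, hwalk⟩ := hz rfl
  have hA : ∃ st' x' y', (bodyOf data).foldl stepA (some (PySem.Dict.empty, [], 0, 0))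
      = some (d1, st', x', y') := by
    rcases (sim_walk_alts (2 * (bodyOf data).length + 2)).1 (bodyOf data) 0 0
        PySem.Dict.empty [] _ _ hwalk with ⟨x', y', hrun⟩ | ⟨_, st', x', y', hrun⟩
    · exact ⟨[], x', y', hrun⟩
    · exact ⟨st', x', y', hrun⟩
  obtain ⟨st', x', y', hA⟩ := hA
  unfold solve solve_alt
  rw [hA, hwalk]
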